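-- pv_equiv track=rewrite | github.com/jgd78/Wordle-Solver | quordle_solver.py | valid_pat
-- ===== SOURCE A (Python) =====
-- def valid_pat(guess, pattern):
--     valid=True
--     for i in range(len(pattern)):
--         temp_guess=guess
--         temp_pattern=pattern
--         let=temp_guess[i]
--         if let in temp_guess[i+1:] and temp_pattern[i]==0:
--             temp_guess=temp_guess[i+1:]
--             temp_pattern=temp_pattern[i+1:]
--             num_times=temp_guess.count(let)
--
--             for j in range(num_times):
--
--                 let_pos=temp_guess.index(let)
--                 if temp_pattern[let_pos]==1:
--                     valid=False
--                 temp_guess=temp_guess[let_pos+1:]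
--                 temp_pattern=temp_pattern[let_pos+1:]
--     return valid
-- ===== SOURCE B (Python) =====
-- def valid_pat(guess, pattern):
--     # One pass: remember letters already seen with pattern 0; a later 1 on such a letter is invalid.
--     seen_zero = set()
--     for i in range(len(pattern)):
--         let = guess[i]
--         if pattern[i] == 1 and let in seen_zero:
--             return False
--         if pattern[i] == 0:
--             seen_zero.add(let)
--     return True
-- ===== Notes on version B (the rewrite author's own statement) =====
-- stated objective: faster
-- what changed: Replaced A's shrinking-slice/.index walk over later duplicate occurrences by a single left-to-right pass that keeps a set of letters already marked 0 and rejects on the first later 1 for such a letter.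
-- crash fix: When a letter with pattern 0 at position i recurs at a position j >= len(pattern) (pattern shorter than guess), A raises IndexError on temp_pattern[let_pos]; B only reads indices below len(pattern) and returns the validity verdict (e.g. True on ('aa', [0])). — e.g. on valid_pat("aa", [0]): A raises IndexError, B returns true
import Mathlib
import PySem

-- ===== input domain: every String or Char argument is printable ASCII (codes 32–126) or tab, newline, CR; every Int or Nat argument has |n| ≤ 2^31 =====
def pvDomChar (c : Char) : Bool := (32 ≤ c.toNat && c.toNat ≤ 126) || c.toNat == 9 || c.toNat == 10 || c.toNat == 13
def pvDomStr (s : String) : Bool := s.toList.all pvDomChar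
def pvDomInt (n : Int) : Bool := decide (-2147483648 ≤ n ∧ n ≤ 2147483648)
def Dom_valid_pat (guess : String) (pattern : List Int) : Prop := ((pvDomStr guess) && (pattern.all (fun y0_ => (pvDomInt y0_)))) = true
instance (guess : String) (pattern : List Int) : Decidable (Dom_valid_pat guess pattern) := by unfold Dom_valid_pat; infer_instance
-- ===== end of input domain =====

-- B replaces A's quadratic shrinking-slice/.index walk by one linear pass with a set of letters seen with pattern 0.

-- ===== PORT A =====
-- helper: one iteration of A's inner `for j in range(num_times)` loop; state = (valid, temp_guess, temp_pattern).
-- string indexing/slicing/count/index are ported on guess.toList (indices here are nonneg and, under Pre_, in range,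
-- so List.drop/getD/count/index? are exact for the Python slices s[k:], s[i], .count, .index).
def pvInnerStep (let_ : Char) (st : Bool × List Char × List Int) : Bool × List Char × List Int :=
  let let_pos := (PySem.List.index? st.2.1 let_).getD 0
  (if st.2.2.getD let_pos 0 == 1 then false else st.1,
   st.2.1.drop (let_pos + 1), st.2.2.drop (let_pos + 1))

def valid_pat (guess : String) (pattern : List Int) : Bool :=
  let g := guess.toList
  (List.range pattern.length).foldl (fun valid i =>
    let let_ := g.getD i ' '
    if (g.drop (i + 1)).contains let_ && (pattern.getD i 0 == 0) then
      let tg := g.drop (i + 1)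
      let tp := pattern.drop (i + 1)
      let num_times := tg.count let_
      ((List.range num_times).foldl (fun st _ => pvInnerStep let_ st) (valid, tg, tp)).1
    else valid) true

-- ===== PORT B =====
-- helper: B's loop with early `return False`; seen = the Python set `seen_zero`.
def pvAltGo (g : List Char) (pattern : List Int) : List Nat → PySem.Set Char → Bool
  | [], _ => true
  | i :: rest, seen =>
    let let_ := g.getD i ' '
    if pattern.getD i 0 == 1 && PySem.Set.contains seen let_ then false
    else pvAltGo g pattern rest (if pattern.getD i 0 == 0 then PySem.Set.add seen let_ else seen)

def valid_pat_alt (guess : String) (pattern : List Int) : Bool :=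
  pvAltGo guess.toList pattern (List.range pattern.length) PySem.Set.empty

-- ===== PRECONDITION & SPEC =====
-- Pre_ is exactly where the Python A returns: pattern no longer than guess, and no letter with pattern 0 at i
-- recurring at a position j ≥ len(pattern) (there A raises IndexError on temp_pattern[let_pos]).
def Pre_valid_pat (guess : String) (pattern : List Int) : Prop :=
  pattern.length ≤ guess.toList.length ∧
  ∀ i < pattern.length, ∀ j < guess.toList.length, i < j → pattern.length ≤ j →
    guess.toList.getD i ' ' = guess.toList.getD j ' ' → pattern.getD i 0 ≠ 0
instance (guess : String) (pattern : List Int) : Decidable (Pre_valid_pat guess pattern) := by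
  unfold Pre_valid_pat
  refine instDecidableAnd (dq := ?_)
  exact Nat.decidableBallLT _ _

def pvWitness_valid_pat : String × List Int := ("ab", [0, 1])

-- A raises IndexError when a letter with pattern 0 recurs at an index ≥ len(pattern); B returns the verdict there.
def Raises_valid_pat (guess : String) (pattern : List Int) : Prop :=
  pattern.length ≤ guess.toList.length ∧
  ∃ i < pattern.length, ∃ j < guess.toList.length, i < j ∧ pattern.length ≤ j ∧
    guess.toList.getD i ' ' = guess.toList.getD j ' ' ∧ pattern.getD i 0 = 0
instance (guess : String) (pattern : List Int) : Decidable (Raises_valid_pat guess pattern) := by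
  unfold Raises_valid_pat
  refine instDecidableAnd (dq := ?_)
  exact @Nat.decidableExistsLT
    (fun i => ∃ j < guess.toList.length, i < j ∧ pattern.length ≤ j ∧
      guess.toList.getD i ' ' = guess.toList.getD j ' ' ∧ pattern.getD i 0 = 0)
    (fun i => @Nat.decidableExistsLT
      (fun j => i < j ∧ pattern.length ≤ j ∧
        guess.toList.getD i ' ' = guess.toList.getD j ' ' ∧ pattern.getD i 0 = 0)
      (fun j => inferInstance) guess.toList.length)
    pattern.length

def pvRaiseWitness_valid_pat : String × List Int := ("aa", [0])
def pvRaiseWitnessOut_valid_pat : Bool := true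

def Spec_valid_pat (guess : String) (pattern : List Int) (out : Bool) : Prop := out = valid_pat_alt guess pattern
instance (guess : String) (pattern : List Int) (out : Bool) : Decidable (Spec_valid_pat guess pattern out) := by
  unfold Spec_valid_pat; infer_instance

-- ===== CLAIM (what is proved, stated in full; the proofs are below) =====
def Claim_equal_valid_pat : Prop := ∀ (guess : String) (pattern : List Int), Dom_valid_pat guess pattern → Pre_valid_pat guess pattern → Spec_valid_pat guess pattern (valid_pat guess pattern)
def Claim_raises_valid_pat : Prop := (∀ (guess : String) (pattern : List Int), Dom_valid_pat guess pattern → Raises_valid_pat guess pattern → ¬ Pre_valid_pat guess pattern) ∧ (Dom_valid_pat (pvRaiseWitness_valid_pat.1) (pvRaiseWitness_valid_pat.2) ∧ Raises_valid_pat (pvRaiseWitness_valid_pat.1) (pvRaiseWitness_valid_pat.2) ∧ valid_pat_alt (pvRaiseWitness_valid_pat.1) (pvRaiseWitness_valid_pat.2) = pvRaiseWitnessOut_valid_pat)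

-- ===== LEMMAS AND PROOFS =====

-- the common characterisation: some letter has pattern 1 at j after pattern 0 at some i < j
def pvBad (g : List Char) (p : List Int) : Bool :=
  (List.range p.length).any (fun j => p.getD j 0 == 1 &&
    (List.range j).any (fun i => (g.getD i ' ' == g.getD j ' ') && p.getD i 0 == 0))

theorem pvFoldlConst {α : Type} (f : α → α) :
    ∀ (l : List Nat) (s : α), l.foldl (fun s _ => f s) s = f^[l.length] s := by
  intro l
  induction l with
  | nil => intro s; rfl
  | cons x l ih =>
    intro s
    simp only [List.foldl_cons, List.length_cons, Function.iterate_succ_apply]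
    exact ih (f s)

theorem pvFoldlAnd (m : Nat → Bool) :
    ∀ (l : List Nat) (b : Bool), l.foldl (fun v i => v && m i) b = (b && l.all m) := by
  intro l
  induction l with
  | nil => intro b; simp
  | cons x l ih =>
    intro b
    simp only [List.foldl_cons, List.all_cons, ih, Bool.and_assoc]

theorem pvInnerLemma (let_ : Char) :
    ∀ (c : Nat) (tg : List Char) (tp : List Int) (v : Bool),
      tg.count let_ = c →
      (∀ k (_ : k < tg.length), tg[k] = let_ → k < tp.length) →
      ((pvInnerStep let_)^[c] (v, tg, tp)).1
        = (v && !((tg.zip tp).any (fun q => q.1 == let_ && q.2 == 1))) := by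
  intro c
  induction c with
  | zero =>
    intro tg tp v hcount _
    have hnm : let_ ∉ tg := List.count_eq_zero.mp hcount
    have hany : ((tg.zip tp).any (fun q => q.1 == let_ && q.2 == 1)) = false := by
      rw [List.any_eq_false]
      rintro ⟨x, y⟩ hq
      simp only [Bool.and_eq_true, beq_iff_eq, not_and]
      rintro rfl
      exact absurd ((List.of_mem_zip hq).1) hnm
    rw [Function.iterate_zero_apply, hany]
    simp
  | succ c ih =>
    intro tg tp v hcount hk
    have hmem : let_ ∈ tg := List.count_pos_iff.mp (by omega)
    obtain ⟨pos, hpos⟩ := Option.isSome_iff_exists.mp ((PySem.List.index?_isSome_iff tg let_).mpr hmem)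
    obtain ⟨hlt, hat, hbefore⟩ := PySem.List.getElem_of_index?_eq_some hpos
    have hplt : pos < tp.length := hk pos hlt hat
    have htake : (tg.take pos).count let_ = 0 := by
      rw [List.count_eq_zero]
      intro hm
      rw [List.mem_iff_getElem] at hm
      obtain ⟨i, hi, he⟩ := hm
      rw [List.getElem_take] at he
      exact hbefore i (by simp at hi; omega) he
    have htg : tg = tg.take pos ++ tg[pos] :: tg.drop (pos + 1) := by
      conv_lhs => rw [← List.take_append_drop pos tg, List.drop_eq_getElem_cons hlt]
    have htp : tp = tp.take pos ++ tp[pos] :: tp.drop (pos + 1) := by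
      conv_lhs => rw [← List.take_append_drop pos tp, List.drop_eq_getElem_cons hplt]
    have hlen : (tg.take pos).length = (tp.take pos).length := by
      simp [List.length_take]
      omega
    have hzip : tg.zip tp
        = (tg.take pos).zip (tp.take pos) ++ (tg[pos], tp[pos]) :: (tg.drop (pos + 1)).zip (tp.drop (pos + 1)) := by
      conv_lhs => rw [htg, htp]
      rw [List.zip_append hlen, List.zip_cons_cons]
    have hcount' : (tg.drop (pos + 1)).count let_ = c := by
      have := hcount
      conv_lhs at this => rw [htg]
      rw [List.count_append, List.count_cons, htake, hat] at this
      simp at this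
      omega
    have hk' : ∀ k (_ : k < (tg.drop (pos + 1)).length), (tg.drop (pos + 1))[k] = let_ → k < (tp.drop (pos + 1)).length := by
      intro k hkl hke
      rw [List.getElem_drop] at hke
      have := hk (pos + 1 + k) (by rw [List.length_drop] at hkl; omega) hke
      rw [List.length_drop]
      omega
    rw [Function.iterate_succ_apply]
    have hstep : pvInnerStep let_ (v, tg, tp)
        = (if tp.getD pos 0 == 1 then false else v, tg.drop (pos + 1), tp.drop (pos + 1)) := by
      unfold pvInnerStep
      rw [hpos]
      rfl
    rw [hstep, ih _ _ _ hcount' hk', hzip]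
    rw [List.any_append, List.any_cons]
    have htkany : ((tg.take pos).zip (tp.take pos)).any (fun q => q.1 == let_ && q.2 == 1) = false := by
      rw [List.any_eq_false]
      rintro ⟨x, y⟩ hq
      simp only [Bool.and_eq_true, beq_iff_eq, not_and]
      rintro rfl
      exact absurd ((List.of_mem_zip hq).1) (List.count_eq_zero.mp htake)
    rw [htkany, List.getD_eq_getElem tp 0 hplt, hat]
    cases h2 : (tp[pos] == 1) <;> simp [h2]

theorem pvA_eq (guess : String) (pattern : List Int) (h : Pre_valid_pat guess pattern) :
    valid_pat guess pattern = !pvBad guess.toList pattern := by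
  obtain ⟨hle, hpre2⟩ := h
  unfold valid_pat
  simp only []
  have h1 : List.foldl
      (fun (valid : Bool) (i : Nat) =>
        if ((List.drop (i + 1) guess.toList).contains (guess.toList.getD i ' ')
            && pattern.getD i 0 == 0) = true then
          (List.foldl (fun st _ => pvInnerStep (guess.toList.getD i ' ') st)
              (valid, List.drop (i + 1) guess.toList, List.drop (i + 1) pattern)
              (List.range ((List.drop (i + 1) guess.toList).count (guess.toList.getD i ' ')))).1
        else valid)
      true (List.range pattern.length)
      = List.foldl
      (fun (valid : Bool) (i : Nat) =>
        valid && !(((guess.toList.drop (i + 1)).contains (guess.toList.getD i ' ')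
            && (pattern.getD i 0 == 0))
          && ((guess.toList.drop (i + 1)).zip (pattern.drop (i + 1))).any
              (fun q => q.1 == guess.toList.getD i ' ' && q.2 == 1)))
      true (List.range pattern.length) := by
    refine PySem.List.foldl_congr_mem _ _ _ _ ?_
    intro v i hi
    rw [List.mem_range] at hi
    by_cases hc : ((guess.toList.drop (i + 1)).contains (guess.toList.getD i ' ')
        && (pattern.getD i 0 == 0)) = true
    · rw [if_pos hc]
      rw [pvFoldlConst (pvInnerStep (guess.toList.getD i ' ')), List.length_range]
      have hpz : pattern.getD i 0 = 0 := by
        have := (Bool.and_eq_true _ _).mp hc |>.2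
        exact beq_iff_eq.mp this
      have hk : ∀ k (_ : k < (guess.toList.drop (i + 1)).length),
          (guess.toList.drop (i + 1))[k] = guess.toList.getD i ' ' → k < (pattern.drop (i + 1)).length := by
        intro k hkl hke
        rw [List.length_drop] at hkl
        rw [List.getElem_drop] at hke
        rw [List.length_drop]
        by_contra hnk
        have hjn : pattern.length ≤ i + 1 + k := by omega
        have hjg : i + 1 + k < guess.toList.length := by omega
        have hgij : guess.toList.getD i ' ' = guess.toList.getD (i + 1 + k) ' ' := by
          rw [List.getD_eq_getElem guess.toList ' ' hjg, hke]
        exact hpre2 i hi (i + 1 + k) hjg (by omega) hjn hgij hpz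
      rw [pvInnerLemma (guess.toList.getD i ' ') _ _ _ v rfl hk]
      rw [hc, Bool.true_and]
    · rw [if_neg hc]
      rw [eq_false_of_ne_true hc, Bool.false_and, Bool.not_false, Bool.and_true]
  rw [h1]
  rw [pvFoldlAnd, Bool.true_and, List.all_eq_not_any_not]
  simp only [Bool.not_not]
  congr 1
  unfold pvBad
  rw [Bool.eq_iff_iff]
  simp only [List.any_eq_true, List.mem_range, Bool.and_eq_true, beq_iff_eq,
    List.contains_iff_mem]
  constructor
  · rintro ⟨i, hi, ⟨hmem, hpz⟩, q, hq, hq1, hq2⟩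
    rw [List.mem_iff_getElem] at hq
    obtain ⟨k, hkl, hke⟩ := hq
    rw [List.length_zip, List.length_drop, List.length_drop] at hkl
    rw [List.getElem_zip, Prod.ext_iff] at hke
    obtain ⟨hke1, hke2⟩ := hke
    have hkn : i + 1 + k < pattern.length := by omega
    have hkg : i + 1 + k < guess.toList.length := by omega
    have hpj : pattern.getD (i + 1 + k) 0 = 1 := by
      calc pattern.getD (i + 1 + k) 0 = pattern[i + 1 + k]'hkn := List.getD_eq_getElem pattern 0 hkn
        _ = (List.drop (i + 1) pattern)[k]'(by rw [List.length_drop]; omega) := by rw [List.getElem_drop]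
        _ = q.2 := hke2
        _ = 1 := hq2
    have hgj : guess.toList.getD i ' ' = guess.toList.getD (i + 1 + k) ' ' := by
      calc guess.toList.getD i ' ' = q.1 := hq1.symm
        _ = (List.drop (i + 1) guess.toList)[k]'(by rw [List.length_drop]; omega) := hke1.symm
        _ = guess.toList[i + 1 + k]'hkg := by rw [List.getElem_drop]
        _ = guess.toList.getD (i + 1 + k) ' ' := (List.getD_eq_getElem guess.toList ' ' hkg).symm
    exact ⟨i + 1 + k, hkn, hpj, i, by omega, hgj, hpz⟩
  · rintro ⟨j, hj, hpj, i, hij, hgij, hpi⟩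
    have hjg : j < guess.toList.length := by omega
    have hig : i < guess.toList.length := by omega
    have hin : i < pattern.length := by omega
    have hidx : i + 1 + (j - (i + 1)) = j := by omega
    refine ⟨i, hin, ⟨?_, hpi⟩, (guess.toList[j], pattern[j]), ?_, ?_, ?_⟩
    · rw [List.mem_iff_getElem]
      refine ⟨j - (i + 1), by rw [List.length_drop]; omega, ?_⟩
      rw [List.getElem_drop]
      simp only [hidx]
      rw [hgij, List.getD_eq_getElem guess.toList ' ' hjg]
    · rw [List.mem_iff_getElem]
      refine ⟨j - (i + 1), ?_, ?_⟩
      · rw [List.length_zip, List.length_drop, List.length_drop]; omega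
      · rw [List.getElem_zip]
        rw [List.getElem_drop, List.getElem_drop]
        simp only [hidx]
    · rw [hgij, List.getD_eq_getElem guess.toList ' ' hjg]
    · rw [List.getD_eq_getElem pattern 0 (by omega)] at hpj
      exact hpj

theorem pvAltGoLemma (g : List Char) (p : List Int) :
    ∀ (m k : Nat) (s : PySem.Set Char),
      (∀ a, PySem.Set.contains s a = true ↔ ∃ i < k, g.getD i ' ' = a ∧ p.getD i 0 = 0) →
      pvAltGo g p (List.range' k m) s
        = !((List.range' k m).any (fun j => p.getD j 0 == 1 &&
            (List.range j).any (fun i => (g.getD i ' ' == g.getD j ' ') && p.getD i 0 == 0))) := by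
  intro m
  induction m with
  | zero => intro k s _; simp [pvAltGo]
  | succ m ih =>
    intro k s hinv
    have hinv' : ∀ a, PySem.Set.contains
        (if (p.getD k 0 == 0) = true then PySem.Set.add s (g.getD k ' ') else s) a = true
        ↔ ∃ i < k + 1, g.getD i ' ' = a ∧ p.getD i 0 = 0 := by
      intro a
      by_cases hz : p.getD k 0 = 0
      · rw [if_pos (by simp only [beq_iff_eq]; exact hz)]
        rw [PySem.Set.contains_iff, PySem.Set.mem_add, ← PySem.Set.contains_iff, hinv]
        constructor
        · rintro (⟨i, hik, hgi, hpi⟩ | rfl)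
          · exact ⟨i, Nat.lt_succ_of_lt hik, hgi, hpi⟩
          · exact ⟨k, Nat.lt_succ_self k, rfl, hz⟩
        · rintro ⟨i, hik, hgi, hpi⟩
          rcases Nat.lt_succ_iff_lt_or_eq.mp hik with h | rfl
          · exact Or.inl ⟨i, h, hgi, hpi⟩
          · exact Or.inr hgi.symm
      · rw [if_neg (by simp only [beq_iff_eq]; exact hz)]
        rw [hinv]
        constructor
        · rintro ⟨i, hik, hgi, hpi⟩
          exact ⟨i, Nat.lt_succ_of_lt hik, hgi, hpi⟩
        · rintro ⟨i, hik, hgi, hpi⟩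
          rcases Nat.lt_succ_iff_lt_or_eq.mp hik with h | rfl
          · exact ⟨i, h, hgi, hpi⟩
          · exact absurd hpi hz
    have hc : PySem.Set.contains s (g.getD k ' ')
        = (List.range k).any (fun i => (g.getD i ' ' == g.getD k ' ') && p.getD i 0 == 0) := by
      rw [Bool.eq_iff_iff]
      rw [hinv]
      simp [List.any_eq_true, List.mem_range]
    rw [List.range'_succ]
    show (if ((p.getD k 0 == 1) && PySem.Set.contains s (g.getD k ' ')) = true then false
          else pvAltGo g p (List.range' (k + 1) m)
            (if (p.getD k 0 == 0) = true then PySem.Set.add s (g.getD k ' ') else s)) = _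
    rw [List.any_cons, hc]
    by_cases h1 : ((p.getD k 0 == 1) && (List.range k).any (fun i => (g.getD i ' ' == g.getD k ' ') && p.getD i 0 == 0)) = true
    · rw [if_pos h1, h1]
      simp
    · rw [if_neg h1, ih _ _ hinv']
      rw [eq_false_of_ne_true h1, Bool.false_or]

theorem pvB_eq (guess : String) (pattern : List Int) :
    valid_pat_alt guess pattern = !pvBad guess.toList pattern := by
  unfold valid_pat_alt pvBad
  rw [List.range_eq_range']
  rw [pvAltGoLemma guess.toList pattern pattern.length 0 PySem.Set.empty]
  intro a
  simp [PySem.Set.empty]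

-- ===== VERDICT (by name: the statement is the Claim_ definition above) =====
theorem valid_pat_spec : Claim_equal_valid_pat := by
  intro guess pattern _ hpre
  unfold Spec_valid_pat
  rw [pvA_eq guess pattern hpre, pvB_eq]

@[simp] theorem valid_pat_raises : Claim_raises_valid_pat := by
  unfold Claim_raises_valid_pat
  constructor
  · rintro guess pattern _ ⟨hle, i, hi, j, hj, hij, hnj, heq, hz⟩ ⟨_, h2⟩
    exact h2 i hi j hj hij hnj heq hz
  · exact ⟨by decide, by decide, by decide⟩
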